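-- pv_equiv track=rewrite | github.com/COSC-499-W2025/capstone-project-team-6 | src/backend/analysis/git_analysis.py | choose_best_name
-- ===== SOURCE A (Python) =====
-- from typing import Dict, List, Optional, Union
--
-- def choose_best_name(names: List[str]) -> str:
--     """
--     Strategy:
--     1. Prefer longer names (more complete)
--     2. Prefer names with capitals (proper formatting)
--     3. Prefer most common name (if tie)
--     """
--     if not names:
--         return "Unknown"
--
--     if len(names) == 1:
--         return names[0]
--
--     from collections import Counter
--
--     name_counts = Counter(names)
--
--     most_common = name_counts.most_common()
--
--     if len(most_common) == 1:
--         return most_common[0][0]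
--
--     if most_common[0][1] > most_common[1][1]:
--         return most_common[0][0]
--
--     top_names = [name for name, count in most_common if count == most_common[0][1]]
--
--     capitalized = [n for n in top_names if any(c.isupper() for c in n)]
--     if capitalized:
--         return max(capitalized, key=len)
--
--     return max(top_names, key=len)
-- ===== SOURCE B (Python) =====
-- from collections import Counter
--
-- def choose_best_name(names):
--     if not names:
--         return "Unknown"
--     counts = Counter(names)
--     return max(counts, key=lambda n: (counts[n], any(c.isupper() for c in n), len(n)))
-- ===== Notes on version B (the rewrite author's own statement) =====
-- stated objective: simpler
-- what changed: Replaces the most_common() sort plus the strict-greater / capitalized / longest branch cascade with a single max() over the Counter's keys using the composite key (count, has-uppercase, length); the singleton special cases disappear.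
import Mathlib
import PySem

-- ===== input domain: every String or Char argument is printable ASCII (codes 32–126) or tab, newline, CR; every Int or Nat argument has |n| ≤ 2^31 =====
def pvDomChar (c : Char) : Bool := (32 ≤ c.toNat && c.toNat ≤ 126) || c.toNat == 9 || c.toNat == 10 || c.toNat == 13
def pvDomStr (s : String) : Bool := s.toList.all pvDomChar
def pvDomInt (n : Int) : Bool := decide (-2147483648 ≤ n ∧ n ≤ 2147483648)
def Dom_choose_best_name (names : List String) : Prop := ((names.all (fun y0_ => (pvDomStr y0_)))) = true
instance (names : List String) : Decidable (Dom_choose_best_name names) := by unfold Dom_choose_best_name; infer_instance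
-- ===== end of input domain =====

-- B replaces A's most_common() sort and strict-greater / capitalized / longest branch cascade by a
-- single max() over the Counter with the composite key (count, has-uppercase, length): simpler, one pass.

-- ===== PORT A =====
def choose_best_name (names : List String) : String :=
  if names = [] then "Unknown"
  else if names.length = 1 then PySem.List.pyGetD names 0 ""
  else
    let name_counts := PySem.Dict.counter names
    let most_common := PySem.List.sorted name_counts.items (fun p => p.2) true
    if most_common.length = 1 then (PySem.List.pyGetD most_common 0 ("", 0)).1
    else if (PySem.List.pyGetD most_common 0 ("", 0)).2 > (PySem.List.pyGetD most_common 1 ("", 0)).2 then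
      (PySem.List.pyGetD most_common 0 ("", 0)).1
    else
      let top_names := (most_common.filter (fun p => p.2 == (PySem.List.pyGetD most_common 0 ("", 0)).2)).map (fun p => p.1)
      let capitalized := top_names.filter (fun n => n.toList.any PySem.Chars.isupper)
      if capitalized ≠ [] then (PySem.List.max? capitalized (fun n => PySem.Chars.len n.toList)).getD ""
      else (PySem.List.max? top_names (fun n => PySem.Chars.len n.toList)).getD ""

-- ===== PORT B =====
-- Python tuple comparison (int, bool, int) < (int, bool, int): lexicographic, False < True
def tupLt (a b : Int × Bool × Int) : Bool :=
  a.1 < b.1 || (a.1 == b.1 && ((!a.2.1 && b.2.1) || (a.2.1 == b.2.1 && a.2.2 < b.2.2)))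

-- the key lambda of Source B: (counts[n], any(c.isupper() for c in n), len(n))
def bkey (counts : PySem.Dict String Int) (n : String) : Int × Bool × Int :=
  (counts.getD n 0, n.toList.any PySem.Chars.isupper, PySem.Chars.len n.toList)

def choose_best_name_alt (names : List String) : String :=
  if names = [] then "Unknown"
  else
    let counts := PySem.Dict.counter names
    -- max(counts, key=bkey): first key of maximal composite key, scanning in insertion order
    match counts.keys with
    | [] => "Unknown"  -- unreachable: the counter of a nonempty list has a key
    | k :: ks => ks.foldl (fun m x => if tupLt (bkey counts m) (bkey counts x) then x else m) k

-- ===== PRECONDITION & SPEC =====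
def Spec_choose_best_name (names : List String) (out : String) : Prop := out = choose_best_name_alt names
instance (names : List String) (out : String) : Decidable (Spec_choose_best_name names out) := by unfold Spec_choose_best_name; infer_instance

-- ===== CLAIM (what is proved, stated in full; the proofs are below) =====
def Claim_equal_choose_best_name : Prop := ∀ (names : List String), Dom_choose_best_name names → Spec_choose_best_name names (choose_best_name names)

-- ===== LEMMAS AND PROOFS =====

-- the composite key, as a genuinely lexicographically ordered value
def tripLex (a : Int × Bool × Int) : ℤ ×ₗ Bool ×ₗ ℤ := toLex (a.1, toLex (a.2.1, a.2.2))

theorem tupLt_eq (a b : Int × Bool × Int) : tupLt a b = decide (tripLex a < tripLex b) := by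
  obtain ⟨a1, a2, a3⟩ := a
  obtain ⟨b1, b2, b3⟩ := b
  simp only [tupLt, tripLex]
  by_cases h1 : a1 < b1
  · simp [h1, Prod.Lex.lt_iff]
  · by_cases h2 : a1 = b1
    · subst h2
      simp only [h1, decide_false, Bool.false_or, beq_self_eq_true, Bool.true_and]
      by_cases h3 : a2 = b2
      · subst h3
        cases a2 <;> simp [Prod.Lex.lt_iff]
      · cases a2 <;> cases b2 <;> simp_all [Prod.Lex.lt_iff, Bool.lt_iff]
    · have : ¬ tripLex (a1, a2, a3) < tripLex (b1, b2, b3) := by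
        simp [tripLex, Prod.Lex.lt_iff]
        constructor
        · omega
        · intro h; exact absurd h h2
      simp_all [tripLex, Prod.Lex.lt_iff]

-- the composite key of a name, with the counter evaluated: (#occurrences, has-uppercase, length)
def Key (names : List String) (n : String) : ℤ ×ₗ Bool ×ₗ ℤ :=
  tripLex ((names.count n : Int), n.toList.any PySem.Chars.isupper, PySem.Chars.len n.toList)

theorem bkey_counter (names : List String) (n : String) :
    tripLex (bkey (PySem.Dict.counter names) n) = Key names n := by
  simp [bkey, Key, PySem.Dict.getD_counter]

-- "r is the first element of l attaining the maximal key" — the behaviour of Python's max(l, key=·)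
def IsFirstMax {α κ : Type} [LinearOrder κ] (key : α → κ) (l : List α) (r : α) : Prop :=
  (∀ y ∈ l, key y ≤ key r) ∧ ∃ pre suf, l = pre ++ r :: suf ∧ ∀ y ∈ pre, key y < key r

theorem isFirstMax_unique {α κ : Type} [LinearOrder κ] (key : α → κ) (l : List α) (r₁ r₂ : α)
    (h₁ : IsFirstMax key l r₁) (h₂ : IsFirstMax key l r₂) : r₁ = r₂ := by
  obtain ⟨hm₁, p₁, s₁, he₁, hp₁⟩ := h₁
  obtain ⟨hm₂, p₂, s₂, he₂, hp₂⟩ := h₂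
  have hk : key r₁ = key r₂ := le_antisymm (hm₂ r₁ (by rw [he₁]; simp)) (hm₁ r₂ (by rw [he₂]; simp))
  rcases lt_trichotomy p₁.length p₂.length with h | h | h
  · have : r₁ ∈ p₂ := by
      have hget : l[p₁.length]? = some r₁ := by rw [he₁]; simp
      rw [he₂, List.getElem?_append_left h] at hget
      exact List.mem_of_getElem? hget
    exact absurd (hp₂ r₁ this) (by rw [hk]; exact lt_irrefl _)
  · obtain ⟨-, h2⟩ := List.append_inj (he₁.symm.trans he₂) h
    exact (List.cons.injEq _ _ _ _ ▸ h2).1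
  · have : r₂ ∈ p₁ := by
      have hget : l[p₂.length]? = some r₂ := by rw [he₂]; simp
      rw [he₁, List.getElem?_append_left h] at hget
      exact List.mem_of_getElem? hget
    exact absurd (hp₁ r₂ this) (by rw [hk]; exact lt_irrefl _)

theorem isFirstMax_foldl {α κ : Type} [LinearOrder κ] (key : α → κ)
    (t : List α) : ∀ (done : List α) (m : α), IsFirstMax key done m →
    IsFirstMax key (done ++ t) (t.foldl (fun m x => if key m < key x then x else m) m) := by
  induction t with
  | nil => intro done m h; simpa using h
  | cons x t' ih =>
    intro done m h
    obtain ⟨hmax, pre, suf, he, hpre⟩ := h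
    have step : IsFirstMax key (done ++ [x]) (if key m < key x then x else m) := by
      by_cases hc : key m < key x
      · rw [if_pos hc]
        refine ⟨?_, done, [], by simp, ?_⟩
        · intro y hy
          rcases List.mem_append.mp hy with hy | hy
          · exact le_of_lt (lt_of_le_of_lt (hmax y hy) hc)
          · simp at hy; subst hy; exact le_refl _
        · intro y hy; exact lt_of_le_of_lt (hmax y hy) hc
      · rw [if_neg hc]
        refine ⟨?_, pre, suf ++ [x], by simp [he], hpre⟩
        intro y hy
        rcases List.mem_append.mp hy with hy | hy
        · exact hmax y hy
        · simp at hy; subst hy; exact le_of_not_gt hc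
    have := ih (done ++ [x]) _ step
    simpa using this

theorem max?_cons_foldl {α κ : Type} [LinearOrder κ] (key : α → κ) (x : α) (t : List α) :
    PySem.List.max? (x :: t) key =
      some (t.foldl (fun m y => if key m < key y then y else m) x) := by
  show List.foldl _ (some x) t = _
  induction t generalizing x with
  | nil => rfl
  | cons y t' ih => simp only [List.foldl]; rw [← ih]; by_cases h : key x < key y <;> simp [h]

theorem isFirstMax_max? {α κ : Type} [LinearOrder κ] (key : α → κ) (x : α) (t : List α) (r : α)
    (h : PySem.List.max? (x :: t) key = some r) : IsFirstMax key (x :: t) r := by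
  rw [max?_cons_foldl] at h
  have := isFirstMax_foldl key t [x] x ⟨by simp, [], [x].drop 1, by simp, by simp⟩
  simpa [← (Option.some.injEq _ _).mp h] using this

theorem exists_split_of_filter {α : Type} (p : α → Bool) :
    ∀ (l pc sc : List α) (r : α), l.filter p = pc ++ r :: sc →
    ∃ pre suf, l = pre ++ r :: suf ∧ pre.filter p = pc ∧ p r = true := by
  intro l
  induction l with
  | nil => intro pc sc r h; simp at h
  | cons x t ih =>
    intro pc sc r h
    by_cases hx : p x
    · rw [List.filter_cons_of_pos hx] at h
      cases pc with
      | nil =>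
        simp at h
        obtain ⟨h1, -⟩ := h
        exact ⟨[], t, by simp [h1], by simp, h1 ▸ hx⟩
      | cons c cs =>
        simp at h
        obtain ⟨h1, h2⟩ := h
        obtain ⟨pre, suf, he, hf, hr⟩ := ih cs sc r h2
        exact ⟨x :: pre, suf, by simp [he], by rw [← h1, List.filter_cons_of_pos hx, hf], hr⟩
    · rw [List.filter_cons_of_neg hx] at h
      obtain ⟨pre, suf, he, hf, hr⟩ := ih pc sc r h
      exact ⟨x :: pre, suf, by simp [he], by simp [List.filter_cons_of_neg hx, hf], hr⟩

-- stability of Python's reverse sort: filtering out the elements of one key value commutes with sorting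
theorem insertBy_pairwise {α κ : Type} [LinearOrder κ] (key : α → κ) (x : α) :
    ∀ (acc : List α), acc.Pairwise (fun a b => key b ≤ key a) →
    (PySem.List.insertBy (fun a b => decide (key b < key a)) x acc).Pairwise (fun a b => key b ≤ key a) := by
  intro acc
  induction acc with
  | nil => intro _; simp [PySem.List.insertBy]
  | cons y ys ih =>
    intro h
    rw [List.pairwise_cons] at h
    obtain ⟨hy, hys⟩ := h
    by_cases hc : key y < key x
    · simp only [PySem.List.insertBy, hc, decide_true, if_pos]
      refine List.pairwise_cons.mpr ⟨?_, List.pairwise_cons.mpr ⟨hy, hys⟩⟩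
      intro z hz
      rcases List.mem_cons.mp hz with hz | hz
      · exact hz ▸ le_of_lt hc
      · exact le_trans (hy z hz) (le_of_lt hc)
    · have heq : PySem.List.insertBy (fun a b => decide (key b < key a)) x (y :: ys) =
          y :: PySem.List.insertBy (fun a b => decide (key b < key a)) x ys := by
        simp [PySem.List.insertBy, hc]
      rw [heq]
      refine List.pairwise_cons.mpr ⟨?_, ih hys⟩
      intro z hz
      rcases (PySem.List.mem_insertBy _ _ _ _).mp hz with hz | hz
      · exact hz ▸ le_of_not_gt hc
      · exact hy z hz

theorem insertBy_filter_eq {α κ : Type} [LinearOrder κ] (key : α → κ) (c : κ) (x : α) :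
    ∀ (acc : List α), acc.Pairwise (fun a b => key b ≤ key a) →
    (PySem.List.insertBy (fun a b => decide (key b < key a)) x acc).filter (fun z => decide (key z = c)) =
      acc.filter (fun z => decide (key z = c)) ++ List.filter (fun z => decide (key z = c)) [x] := by
  intro acc
  induction acc with
  | nil => intro _; simp [PySem.List.insertBy]
  | cons y ys ih =>
    intro h
    rw [List.pairwise_cons] at h
    obtain ⟨hy, hys⟩ := h
    by_cases hc : key y < key x
    · simp only [PySem.List.insertBy, hc, decide_true, if_pos]
      by_cases hxc : key x = c
      · have hempty : (y :: ys).filter (fun z => decide (key z = c)) = [] := by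
          rw [List.filter_eq_nil_iff]
          intro z hz
          rcases List.mem_cons.mp hz with hz | hz
          · subst hz; simp only [decide_eq_true_eq]; intro he; rw [he, ← hxc] at hc; exact lt_irrefl _ hc
          · simp only [decide_eq_true_eq]; intro he
            have := hy z hz
            rw [he, ← hxc] at this
            exact absurd (lt_of_lt_of_le hc this) (lt_irrefl _)
        rw [List.filter_cons_of_pos (by simp [hxc]), hempty]
        simp [hxc]
      · rw [List.filter_cons_of_neg (by simp [hxc])]
        simp [hxc]
    · have heq : PySem.List.insertBy (fun a b => decide (key b < key a)) x (y :: ys) =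
          y :: PySem.List.insertBy (fun a b => decide (key b < key a)) x ys := by
        simp [PySem.List.insertBy, hc]
      rw [heq, List.filter_cons, List.filter_cons (xs := ys), ih hys]
      by_cases hyc : key y = c <;> simp [hyc]

theorem foldl_insertBy_filter {α κ : Type} [LinearOrder κ] (key : α → κ) (c : κ) :
    ∀ (l acc : List α), acc.Pairwise (fun a b => key b ≤ key a) →
    (l.foldl (fun acc x => PySem.List.insertBy (fun a b => decide (key b < key a)) x acc) acc).filter
        (fun z => decide (key z = c)) =
      acc.filter (fun z => decide (key z = c)) ++ l.filter (fun z => decide (key z = c)) := by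
  intro l
  induction l with
  | nil => intro acc _; simp
  | cons x t ih =>
    intro acc hacc
    simp only [List.foldl]
    rw [ih _ (insertBy_pairwise key x acc hacc), insertBy_filter_eq key c x acc hacc]
    by_cases hxc : key x = c
    · rw [List.filter_cons_of_pos (by simp [hxc])]; simp [hxc]
    · rw [List.filter_cons_of_neg (by simp [hxc])]; simp [hxc]

theorem sorted_rev_filter_key {α κ : Type} [LinearOrder κ] (xs : List α) (key : α → κ) (c : κ) :
    (PySem.List.sorted xs key true).filter (fun z => decide (key z = c)) =
      xs.filter (fun z => decide (key z = c)) := by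
  rw [PySem.List.sorted_rev_eq_foldl_insertBy]
  simpa using foldl_insertBy_filter key c xs [] (by simp)

-- lifting a first-max over the capitalised sub-list to the (has-uppercase, length) key
theorem isFirstMax_cap {α : Type} (hU : α → Bool) (len : α → ℤ) (top : List α) (r : α)
    (h : IsFirstMax len (top.filter hU) r) :
    IsFirstMax (fun n => toLex (hU n, len n) : α → Bool ×ₗ ℤ) top r := by
  obtain ⟨hmaxc, pc, sc, hec, hpc⟩ := h
  have hrcap : r ∈ top.filter hU := by rw [hec]; simp
  have hUr : hU r = true := (List.mem_filter.mp hrcap).2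
  obtain ⟨pre, suf, he, hf, -⟩ := exists_split_of_filter hU top pc sc r hec
  refine ⟨?_, pre, suf, he, ?_⟩
  · intro y hy
    by_cases hUy : hU y
    · have : len y ≤ len r := hmaxc y (List.mem_filter.mpr ⟨hy, hUy⟩)
      rw [Prod.Lex.le_iff]
      exact Or.inr ⟨by simp [hUy, hUr], this⟩
    · rw [Prod.Lex.le_iff]
      exact Or.inl (by simp_all [Bool.lt_iff])
  · intro y hy
    by_cases hUy : hU y
    · have : y ∈ pc := by rw [← hf]; exact List.mem_filter.mpr ⟨hy, hUy⟩
      rw [Prod.Lex.lt_iff]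
      exact Or.inr ⟨by simp [hUy, hUr], hpc y this⟩
    · rw [Prod.Lex.lt_iff]
      exact Or.inl (by simp_all [Bool.lt_iff])

theorem isFirstMax_nocap {α : Type} (hU : α → Bool) (len : α → ℤ) (top : List α) (r : α)
    (hcap : top.filter hU = []) (h : IsFirstMax len top r) :
    IsFirstMax (fun n => toLex (hU n, len n) : α → Bool ×ₗ ℤ) top r := by
  have hall : ∀ y ∈ top, hU y = false := by
    intro y hy
    by_contra hc
    have : y ∈ top.filter hU := List.mem_filter.mpr ⟨hy, by simpa using hc⟩
    simp [hcap] at this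
  obtain ⟨hmax, pre, suf, he, hpre⟩ := h
  have hrtop : r ∈ top := by rw [he]; simp
  refine ⟨?_, pre, suf, he, ?_⟩
  · intro y hy
    rw [Prod.Lex.le_iff]
    exact Or.inr ⟨by simp [hall y hy, hall r hrtop], hmax y hy⟩
  · intro y hy
    have hytop : y ∈ top := by rw [he]; exact List.mem_append.mpr (Or.inl hy)
    rw [Prod.Lex.lt_iff]
    exact Or.inr ⟨by simp [hall y hytop, hall r hrtop], hpre y hy⟩

-- lifting a first-max over the maximal-count sub-list to the full (count, …) key
theorem isFirstMax_lift {α : Type} (cnt : α → ℤ) (k2 : α → Bool ×ₗ ℤ) (m : ℤ) (ds top : List α) (r : α)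
    (htop : ds.filter (fun k => decide (cnt k = m)) = top)
    (hmax : ∀ y ∈ ds, cnt y ≤ m)
    (h : IsFirstMax k2 top r) :
    IsFirstMax (fun n => toLex (cnt n, k2 n) : α → ℤ ×ₗ Bool ×ₗ ℤ) ds r := by
  obtain ⟨hm2, pt, st, het, hpt⟩ := h
  obtain ⟨pre, suf, he, hf, hr⟩ := exists_split_of_filter _ ds pt st r (htop.trans het)
  have hcr : cnt r = m := by simpa using hr
  refine ⟨?_, pre, suf, he, ?_⟩
  · intro y hy
    rcases lt_or_eq_of_le (hmax y hy) with hlt | heq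
    · rw [Prod.Lex.le_iff]; exact Or.inl (by simpa [hcr] using hlt)
    · have hytop : y ∈ top := by
        rw [← htop]; exact List.mem_filter.mpr ⟨hy, by simpa using heq⟩
      rw [Prod.Lex.le_iff]
      exact Or.inr ⟨by simp [hcr, heq], hm2 y hytop⟩
  · intro y hy
    have hyds : y ∈ ds := by rw [he]; exact List.mem_append.mpr (Or.inl hy)
    by_cases hyc : cnt y = m
    · have : y ∈ pt := by rw [← hf]; exact List.mem_filter.mpr ⟨hy, by simpa using hyc⟩
      rw [Prod.Lex.lt_iff]
      exact Or.inr ⟨by simp [hcr, hyc], hpt y this⟩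
    · rw [Prod.Lex.lt_iff]
      exact Or.inl (by simpa [hcr] using lt_of_le_of_ne (hmax y hyds) hyc)

-- B computes the first name of maximal composite key, in first-appearance order
theorem isFirstMax_B (names : List String) (hne : names ≠ []) :
    IsFirstMax (Key names) (PySem.Set.ofList names) (choose_best_name_alt names) := by
  unfold choose_best_name_alt
  rw [if_neg hne]
  have hkeys : (PySem.Dict.counter names).keys = PySem.Set.ofList names :=
    PySem.Dict.keys_counter names
  obtain ⟨x, t, hxt⟩ : ∃ x t, names = x :: t := by
    cases names with
    | nil => exact absurd rfl hne
    | cons x t => exact ⟨x, t, rfl⟩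
  have hmem : x ∈ PySem.Set.ofList names := (PySem.Set.mem_ofList _ _).mpr (by rw [hxt]; simp)
  obtain ⟨k, ks, hds⟩ : ∃ k ks, PySem.Set.ofList names = k :: ks := by
    cases hd : PySem.Set.ofList names with
    | nil => rw [hd] at hmem; simp at hmem
    | cons k ks => exact ⟨k, ks, rfl⟩
  simp only [hkeys, hds]
  have hstep : (fun (m y : String) =>
      if tupLt (bkey (PySem.Dict.counter names) m) (bkey (PySem.Dict.counter names) y) then y else m) =
      (fun m y => if Key names m < Key names y then y else m) := by
    funext m y
    rw [tupLt_eq, bkey_counter, bkey_counter]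
    by_cases h : Key names m < Key names y <;> simp [h]
  rw [hstep]
  have := isFirstMax_foldl (Key names) ks [k] k ⟨by simp, [], [], rfl, by simp⟩
  simpa using this

-- so does A, in every branch
theorem key_lt_of_cnt_lt (names : List String) (y r : String)
    (h : (names.count y : Int) < (names.count r : Int)) : Key names y < Key names r := by
  simp only [Key, tripLex]
  rw [Prod.Lex.lt_iff]
  exact Or.inl h

set_option maxHeartbeats 1000000 in
theorem isFirstMax_A (names : List String) (hne : names ≠ []) :
    IsFirstMax (Key names) (PySem.Set.ofList names) (choose_best_name names) := by
  have hitems : (PySem.Dict.counter names).items =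
      (PySem.Set.ofList names).map (fun k => (k, (names.count k : Int))) :=
    PySem.Dict.items_counter names
  unfold choose_best_name
  rw [if_neg hne]
  by_cases hlen : names.length = 1
  · rw [if_pos hlen]
    obtain ⟨a, rfl⟩ := List.length_eq_one_iff.mp hlen
    have hget : PySem.List.pyGetD [a] (0 : Int) "" = a := by simp [pysem]
    rw [hget]
    exact ⟨by intro y hy; simp only [show PySem.Set.ofList [a] = [a] from rfl] at hy;
              simp at hy; rw [hy], [], [], rfl, by simp⟩
  · rw [if_neg hlen]
    show IsFirstMax (Key names) (PySem.Set.ofList names)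
      (let most_common := PySem.List.sorted (PySem.Dict.counter names).items (fun p => p.2) true
       if most_common.length = 1 then (PySem.List.pyGetD most_common 0 ("", 0)).1
       else if (PySem.List.pyGetD most_common 0 ("", 0)).2 > (PySem.List.pyGetD most_common 1 ("", 0)).2 then
         (PySem.List.pyGetD most_common 0 ("", 0)).1
       else
         let top_names := (most_common.filter (fun p => p.2 == (PySem.List.pyGetD most_common 0 ("", 0)).2)).map (fun p => p.1)
         let capitalized := top_names.filter (fun n => n.toList.any PySem.Chars.isupper)
         if capitalized ≠ [] then (PySem.List.max? capitalized (fun n => PySem.Chars.len n.toList)).getD ""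
         else (PySem.List.max? top_names (fun n => PySem.Chars.len n.toList)).getD "")
    set ds := PySem.Set.ofList names with hdsdef
    set s := PySem.List.sorted (PySem.Dict.counter names).items (fun p => p.2) true with hsdef
    obtain ⟨x, t, hxt⟩ : ∃ x t, names = x :: t := by
      cases names with
      | nil => exact absurd rfl hne
      | cons x t => exact ⟨x, t, rfl⟩
    have hxds : x ∈ ds := (PySem.Set.mem_ofList _ _).mpr (by rw [hxt]; simp)
    have hlens : s.length = ds.length := by
      rw [hsdef, PySem.List.length_sorted, hitems, List.length_map]
    have hcnt_mem : ∀ y ∈ ds, (y, (names.count y : Int)) ∈ (PySem.Dict.counter names).items := by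
      intro y hy
      rw [hitems]
      exact List.mem_map.mpr ⟨y, hy, rfl⟩
    by_cases hs1 : s.length = 1
    · rw [if_pos hs1]
      obtain ⟨a, hda⟩ := List.length_eq_one_iff.mp (by rw [← hlens, hs1] : ds.length = 1)
      obtain ⟨p, hp⟩ := List.length_eq_one_iff.mp hs1
      have hpmem : p ∈ (PySem.Dict.counter names).items := by
        have : p ∈ s := by rw [hp]; simp
        rw [hsdef] at this
        exact (PySem.List.mem_sorted _ _ _ _).mp this
      rw [hitems, hda] at hpmem
      simp at hpmem
      have hget : PySem.List.pyGetD s (0 : Int) ("", 0) = p := by rw [hp]; simp [pysem]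
      rw [hget, hpmem]
      exact ⟨by intro y hy; rw [hda] at hy; simp at hy; rw [hy],
             [], [], by simp [hda], by simp⟩
    · rw [if_neg hs1]
      obtain ⟨p0, s', hs'⟩ := List.exists_cons_of_ne_nil
        (by intro h; rw [h] at hs1 hlens; simp at hs1 hlens; exact hne (by
          have : ds = [] := List.length_eq_zero_iff.mp hlens.symm
          rw [hdsdef] at this
          exact absurd ((PySem.Set.mem_ofList _ _).mpr (by rw [hxt]; simp) : x ∈ PySem.Set.ofList names) (by rw [this]; simp)) : s ≠ [])
      obtain ⟨p1, rest, hrest⟩ := List.exists_cons_of_ne_nil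
        (by intro h; rw [hs', h] at hs1; simp at hs1 : s' ≠ [])
      have hs : s = p0 :: p1 :: rest := by rw [hs', hrest]
      have h0 : PySem.List.pyGetD s (0 : Int) ("", 0) = p0 := by rw [hs]; simp [pysem]
      have h1 : PySem.List.pyGetD s (1 : Int) ("", 0) = p1 := by rw [hs]; simp [pysem]
      rw [h0, h1]
      have hsorteq : PySem.List.sorted (PySem.Dict.counter names).items (fun p => p.2) true
          = p0 :: p1 :: rest := by rw [← hsdef, hs]
      have hmaxall : ∀ q ∈ (PySem.Dict.counter names).items, q.2 ≤ p0.2 :=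
        PySem.List.key_head_sorted_rev_ge _ _ hsorteq
      have hmax : ∀ y ∈ ds, (names.count y : Int) ≤ p0.2 := fun y hy => hmaxall _ (hcnt_mem y hy)
      have hp0 : p0 ∈ (PySem.Dict.counter names).items := by
        have : p0 ∈ s := by rw [hs]; simp
        rw [hsdef] at this
        exact (PySem.List.mem_sorted _ _ _ _).mp this
      obtain ⟨a0, ha0ds, ha0⟩ : ∃ a0, a0 ∈ ds ∧ p0 = (a0, (names.count a0 : Int)) := by
        rw [hitems] at hp0
        obtain ⟨k, hk, hke⟩ := List.mem_map.mp hp0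
        exact ⟨k, hk, hke.symm⟩
      have hpair : (p0 :: p1 :: rest).Pairwise (fun a b : String × Int => b.2 ≤ a.2) := by
        rw [← hsorteq]
        exact PySem.List.sorted_pairwise_rev _ _
      have htail : ∀ q ∈ p1 :: rest, q.2 ≤ p1.2 := by
        intro q hq
        rcases List.mem_cons.mp hq with hq | hq
        · rw [hq]
        · exact ((List.pairwise_cons.mp (List.pairwise_cons.mp hpair).2).1) q hq
      by_cases hgt : p0.2 > p1.2
      · rw [if_pos hgt]
        have hstrict : ∀ y ∈ ds, y ≠ a0 → (names.count y : Int) < p0.2 := by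
          intro y hy hya
          have hmem' := hcnt_mem y hy
          have hins : (y, (names.count y : Int)) ∈ s := by
            rw [hsdef]
            exact (PySem.List.mem_sorted _ _ _ _).mpr hmem'
          rw [hs] at hins
          rcases List.mem_cons.mp hins with hq | hq
          · exact absurd (congrArg Prod.fst hq) (by rw [ha0]; exact hya)
          · exact lt_of_le_of_lt (htail _ hq) hgt
        have hnd : ds.Nodup := PySem.Set.nodup_ofList names
        obtain ⟨pre, suf, he⟩ := List.append_of_mem ha0ds
        have hnotpre : a0 ∉ pre := by
          rw [he] at hnd
          have := List.disjoint_of_nodup_append hnd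
          exact fun hm => this hm (by simp)
        have hr1 : p0.1 = a0 := by rw [ha0]
        rw [hr1]
        refine ⟨?_, pre, suf, he, ?_⟩
        · intro y hy
          by_cases hya : y = a0
          · rw [hya]
          · exact le_of_lt (key_lt_of_cnt_lt names y a0
              (by rw [show ((names.count a0 : Int)) = p0.2 from by rw [ha0]]
                  exact hstrict y hy hya))
        · intro y hy
          have hyds : y ∈ ds := by rw [he]; exact List.mem_append.mpr (Or.inl hy)
          have hya : y ≠ a0 := fun hcontra => hnotpre (hcontra ▸ hy)
          exact key_lt_of_cnt_lt names y a0
            (by rw [show ((names.count a0 : Int)) = p0.2 from by rw [ha0]]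
                exact hstrict y hyds hya)
      · rw [if_neg hgt]
        have hstab : s.filter (fun p : String × Int => decide (p.2 = p0.2)) =
            (PySem.Dict.counter names).items.filter (fun p : String × Int => decide (p.2 = p0.2)) := by
          rw [hsdef]
          exact sorted_rev_filter_key _ (fun p : String × Int => p.2) p0.2
        have htop : (s.filter (fun p : String × Int => p.2 == p0.2)).map (fun p => p.1) =
            ds.filter (fun k => decide ((names.count k : Int) = p0.2)) := by
          rw [show (fun p : String × Int => p.2 == p0.2) = (fun p : String × Int => decide (p.2 = p0.2))
                from funext fun p => Bool.beq_eq_decide_eq _ _,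
              hstab, hitems, List.filter_map, List.map_map]
          simp [Function.comp_def]
        rw [htop]
        have ha02 : p0.2 = (names.count a0 : Int) := by rw [ha0]
        have ha0top : a0 ∈ ds.filter (fun k => decide ((names.count k : Int) = p0.2)) :=
          List.mem_filter.mpr ⟨ha0ds, by simp [ha02]⟩
        have htopne : ds.filter (fun k => decide ((names.count k : Int) = p0.2)) ≠ [] :=
          List.ne_nil_of_mem ha0top
        by_cases hcap : (ds.filter (fun k => decide ((names.count k : Int) = p0.2))).filter
            (fun n => n.toList.any PySem.Chars.isupper) = []
        · rw [if_neg (fun h => h hcap)]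
          obtain ⟨c, cs, hcc⟩ := List.exists_cons_of_ne_nil htopne
          rw [hcc, max?_cons_foldl, Option.getD_some]
          have hfm := isFirstMax_max? (fun n : String => PySem.Chars.len n.toList) c cs _
            (max?_cons_foldl (fun n : String => PySem.Chars.len n.toList) c cs)
          rw [← hcc] at hfm
          have hkey2 := isFirstMax_nocap (fun n : String => n.toList.any PySem.Chars.isupper)
            (fun n : String => PySem.Chars.len n.toList) _ _ hcap hfm
          exact isFirstMax_lift (fun n : String => (names.count n : Int))
            (fun n : String => toLex (n.toList.any PySem.Chars.isupper, PySem.Chars.len n.toList))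
            p0.2 ds _ _ rfl hmax hkey2
        · rw [if_pos hcap]
          obtain ⟨c, cs, hcc⟩ := List.exists_cons_of_ne_nil hcap
          rw [hcc, max?_cons_foldl, Option.getD_some]
          have hfm := isFirstMax_max? (fun n : String => PySem.Chars.len n.toList) c cs _
            (max?_cons_foldl (fun n : String => PySem.Chars.len n.toList) c cs)
          rw [← hcc] at hfm
          have hkey2 := isFirstMax_cap (fun n : String => n.toList.any PySem.Chars.isupper)
            (fun n : String => PySem.Chars.len n.toList) _ _ hfm
          exact isFirstMax_lift (fun n : String => (names.count n : Int))
            (fun n : String => toLex (n.toList.any PySem.Chars.isupper, PySem.Chars.len n.toList))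
            p0.2 ds _ _ rfl hmax hkey2

-- ===== VERDICT (by name: the statement is the Claim_ definition above) =====
theorem choose_best_name_spec : Claim_equal_choose_best_name := by
  intro names _
  unfold Spec_choose_best_name
  by_cases hne : names = []
  · subst hne; rfl
  · exact isFirstMax_unique (Key names) (PySem.Set.ofList names) _ _
      (isFirstMax_A names hne) (isFirstMax_B names hne)
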